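-- pv_equiv track=rewrite | github.com/Christian-Arce/TP_Info1 | main.py | generate_strings
-- ===== SOURCE A (Python) =====
-- import itertools
--
-- def generate_strings(alphabet, from_string, to_string):
--     # Inicializamos una lista vacía para almacenar las cadenas generadas
--     strings = []
--
--     # Determinamos la longitud mínima y máxima de las cadenas a generar
--     min_length = len(from_string) if from_string else 0
--     max_length = len(to_string)
--
--     # Iteramos sobre el rango de longitudes posibles
--     for length in range(min_length, max_length + 1):
--         # Para cada longitud, generamos todas las posibles cadenas
--         for string_tuple in itertools.product(alphabet, repeat=length):
--             # Convertimos la tupla a una cadena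
--             string = ''.join(string_tuple)
--             # Verificamos si la cadena está dentro del rango especificado
--             if (length == min_length and string >= from_string) or (length == max_length and string <= to_string) or (min_length < length < max_length):
--                 # Si la cadena está dentro del rango, la agregamos a la lista
--                 strings.append(string)
--
--     # Devolvemos la lista de cadenas generadas
--     return strings
-- ===== SOURCE B (Python) =====
-- def generate_strings(alphabet, from_string, to_string):
--     # Level-by-level prefix extension instead of itertools.product per length:
--     # prefixes of length k are reused to build those of length k+1.
--     min_len = len(from_string) if from_string else 0
--     max_len = len(to_string)
--     out = []
--     prefixes = ['']
--     for length in range(max_len + 1):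
--         if length != 0:
--             prefixes = [p + c for p in prefixes for c in alphabet]
--         if length < min_len:
--             continue
--         out.extend([s for s in prefixes
--                     if (length == min_len and s >= from_string)
--                     or (length == max_len and s <= to_string)
--                     or (min_len < length < max_len)])
--     return out
-- ===== Notes on version B (the rewrite author's own statement) =====
-- stated objective: alternative
-- what changed: Replaces per-length regeneration via itertools.product with a single level-by-level prefix list that is extended by one alphabet element per length and reused across lengths, emitting the same filtered strings in the same order.
import Mathlib
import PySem

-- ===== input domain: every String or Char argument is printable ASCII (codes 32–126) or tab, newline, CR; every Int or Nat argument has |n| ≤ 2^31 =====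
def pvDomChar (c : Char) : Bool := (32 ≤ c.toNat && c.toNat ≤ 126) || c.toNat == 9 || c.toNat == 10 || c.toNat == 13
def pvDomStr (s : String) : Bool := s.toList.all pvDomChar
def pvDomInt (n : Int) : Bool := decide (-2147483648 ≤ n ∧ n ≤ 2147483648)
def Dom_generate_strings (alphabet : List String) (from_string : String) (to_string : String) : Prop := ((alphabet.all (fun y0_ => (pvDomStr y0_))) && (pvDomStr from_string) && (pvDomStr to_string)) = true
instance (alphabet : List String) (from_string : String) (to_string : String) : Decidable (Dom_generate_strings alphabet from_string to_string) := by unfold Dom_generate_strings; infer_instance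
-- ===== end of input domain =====

-- B replaces the per-length itertools.product regeneration by one level-by-level prefix
-- extension whose prefix list is reused across lengths (objective: alternative decomposition).

-- ===== PORT A =====
-- itertools.product(alphabet, repeat=n), as lists, in product order (leftmost varies slowest)
def pyProductRep (alphabet : List String) : Nat → List (List String)
  | 0 => [[]]
  | n + 1 => alphabet.flatMap (fun a => (pyProductRep alphabet n).map (fun t => a :: t))

def generate_strings (alphabet : List String) (from_string : String) (to_string : String) : List String :=
  let min_length : Nat := if from_string ≠ "" then (PySem.Str.len from_string).toNat else 0
  let max_length : Nat := (PySem.Str.len to_string).toNat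
  (List.range' min_length (max_length + 1 - min_length)).foldl
    (fun strings length =>
      (pyProductRep alphabet length).foldl
        (fun strings string_tuple =>
          let string := PySem.Str.join "" string_tuple
          if (length = min_length ∧ from_string ≤ string) ∨
             (length = max_length ∧ string ≤ to_string) ∨
             (min_length < length ∧ length < max_length)
          then strings ++ [string] else strings)
        strings)
    []

-- ===== PORT B =====
-- prefixes of length k, each extended by one alphabet element, give those of length k+1
def gsExtend (alphabet : List String) (prefixes : List String) : List String :=
  prefixes.flatMap (fun p => alphabet.map (fun c => p ++ c))

-- one iteration of B's loop over `length`; state = (prefixes, out)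
def gsStep (alphabet : List String) (from_string : String) (to_string : String)
    (min_len max_len : Nat) (st : List String × List String) (length : Nat) :
    List String × List String :=
  let prefixes := if length = 0 then st.1 else gsExtend alphabet st.1
  if length < min_len then (prefixes, st.2)
  else (prefixes, st.2 ++ prefixes.filter (fun s =>
    decide ((length = min_len ∧ from_string ≤ s) ∨
            (length = max_len ∧ s ≤ to_string) ∨
            (min_len < length ∧ length < max_len))))

def generate_strings_alt (alphabet : List String) (from_string : String) (to_string : String) : List String :=
  let min_len : Nat := if from_string ≠ "" then (PySem.Str.len from_string).toNat else 0
  let max_len : Nat := (PySem.Str.len to_string).toNat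
  ((List.range (max_len + 1)).foldl (gsStep alphabet from_string to_string min_len max_len)
    ([""], [])).2

-- ===== PRECONDITION & SPEC =====
def Spec_generate_strings (alphabet : List String) (from_string : String) (to_string : String) (out : List String) : Prop := out = generate_strings_alt alphabet from_string to_string
instance (alphabet : List String) (from_string : String) (to_string : String) (out : List String) : Decidable (Spec_generate_strings alphabet from_string to_string out) := by unfold Spec_generate_strings; infer_instance

-- ===== CLAIM (what is proved, stated in full; the proofs are below) =====
def Claim_equal_generate_strings : Prop := ∀ (alphabet : List String) (from_string : String) (to_string : String), Dom_generate_strings alphabet from_string to_string → Spec_generate_strings alphabet from_string to_string (generate_strings alphabet from_string to_string)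

-- ===== LEMMAS AND PROOFS =====

-- the boundary filter both programs apply, as a Bool predicate
def condF (f t : String) (mi ma ℓ : Nat) : String → Bool := fun s =>
  decide ((ℓ = mi ∧ f ≤ s) ∨ (ℓ = ma ∧ s ≤ t) ∨ (mi < ℓ ∧ ℓ < ma))

-- iterated extension: all concatenations of n alphabet elements appended to each seed
def extI (al : List String) : Nat → List String → List String
  | 0, l => l
  | n + 1, l => extI al n (gsExtend al l)

theorem extI_nil (al : List String) (n : Nat) : extI al n [] = [] := by
  induction n with
  | zero => rfl
  | succ n ih => simp [extI, gsExtend, ih]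

theorem extI_append (al : List String) (n : Nat) (l1 l2 : List String) :
    extI al n (l1 ++ l2) = extI al n l1 ++ extI al n l2 := by
  induction n generalizing l1 l2 with
  | zero => rfl
  | succ n ih => simp only [extI, gsExtend, List.flatMap_append, ih]

theorem extI_flat (al : List String) (n : Nat) (l : List String) :
    extI al n l = l.flatMap (fun p => extI al n [p]) := by
  induction l with
  | nil => simp [extI_nil]
  | cons p rest ih =>
      have h : p :: rest = [p] ++ rest := rfl
      rw [h, extI_append, ih]; rfl

theorem extI_ext (al : List String) (n : Nat) (l : List String) :
    extI al n (gsExtend al l) = gsExtend al (extI al n l) := by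
  induction n generalizing l with
  | zero => rfl
  | succ n ih => simp only [extI]; rw [ih]

theorem join_empty_nil : PySem.Str.join "" [] = "" := by decide

theorem join_empty_cons (a : String) (ts : List String) :
    PySem.Str.join "" (a :: ts) = a ++ PySem.Str.join "" ts := by
  rw [← String.toList_inj]
  cases ts with
  | nil =>
      simp [PySem.Str.toList_join, String.toList_append, PySem.Chars.join_singleton,
        PySem.Chars.join_nil]
  | cons b r =>
      simp [PySem.Str.toList_join, String.toList_append, PySem.Chars.join_cons_cons]

-- B's incremental levels enumerate exactly A's joined product tuples, in the same order
theorem extI_single (al : List String) (n : Nat) :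
    ∀ p : String, extI al n [p] =
      (pyProductRep al n).map (fun t => p ++ PySem.Str.join "" t) := by
  induction n with
  | zero => intro p; simp [extI, pyProductRep, join_empty_nil]
  | succ n ih =>
      intro p
      have h1 : extI al (n+1) [p] = extI al n (gsExtend al [p]) := rfl
      have h2 : gsExtend al [p] = al.map (fun a => p ++ a) := by simp [gsExtend]
      rw [h1, h2, extI_flat, List.flatMap_map]
      simp only [ih]
      show _ = (al.flatMap (fun a => (pyProductRep al n).map (fun t => a :: t))).map
        (fun t => p ++ PySem.Str.join "" t)
      rw [List.map_flatMap]
      apply List.flatMap_congr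
      intro a _
      rw [List.map_map]
      apply List.map_congr_left
      intro t _
      show (p ++ a) ++ PySem.Str.join "" t = p ++ PySem.Str.join "" (a :: t)
      rw [join_empty_cons, String.append_assoc]

theorem map_join_prod (al : List String) (n : Nat) :
    (pyProductRep al n).map (fun t => PySem.Str.join "" t) = extI al n [""] := by
  rw [extI_single]
  apply List.map_congr_left
  intro t _
  rw [String.empty_append]

-- A's double fold, for arbitrary bounds, as a flatMap of filtered levels
theorem A_fold (al : List String) (f t : String) (mi ma : Nat) :
    (List.range' mi (ma + 1 - mi)).foldl
      (fun strings length =>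
        (pyProductRep al length).foldl
          (fun strings string_tuple =>
            let string := PySem.Str.join "" string_tuple
            if (length = mi ∧ f ≤ string) ∨ (length = ma ∧ string ≤ t) ∨
               (mi < length ∧ length < ma)
            then strings ++ [string] else strings)
          strings)
      []
    = (List.range' mi (ma + 1 - mi)).flatMap
        (fun ℓ => (extI al ℓ [""]).filter (condF f t mi ma ℓ)) := by
  have hin : ∀ (ℓ : Nat) (acc : List String),
      (pyProductRep al ℓ).foldl
        (fun strings string_tuple =>
          let string := PySem.Str.join "" string_tuple
          if (ℓ = mi ∧ f ≤ string) ∨ (ℓ = ma ∧ string ≤ t) ∨ (mi < ℓ ∧ ℓ < ma)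
          then strings ++ [string] else strings)
        acc
      = acc ++ (extI al ℓ [""]).filter (condF f t mi ma ℓ) := by
    intro ℓ acc
    show (pyProductRep al ℓ).foldl
        (fun strings string_tuple =>
          if (ℓ = mi ∧ f ≤ PySem.Str.join "" string_tuple) ∨
             (ℓ = ma ∧ PySem.Str.join "" string_tuple ≤ t) ∨ (mi < ℓ ∧ ℓ < ma)
          then strings ++ [PySem.Str.join "" string_tuple] else strings)
        acc = _
    rw [← List.foldl_map (f := fun string_tuple => PySem.Str.join "" string_tuple)
      (g := fun strings s =>
        if (ℓ = mi ∧ f ≤ s) ∨ (ℓ = ma ∧ s ≤ t) ∨ (mi < ℓ ∧ ℓ < ma)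
        then strings ++ [s] else strings)]
    rw [PySem.List.foldl_append_ite_eq_filter
      (p := fun s => (ℓ = mi ∧ f ≤ s) ∨ (ℓ = ma ∧ s ≤ t) ∨ (mi < ℓ ∧ ℓ < ma))]
    rw [map_join_prod]
    rfl
  have hout : (fun (strings : List String) (length : Nat) =>
      (pyProductRep al length).foldl
        (fun strings string_tuple =>
          let string := PySem.Str.join "" string_tuple
          if (length = mi ∧ f ≤ string) ∨ (length = ma ∧ string ≤ t) ∨
             (mi < length ∧ length < ma)
          then strings ++ [string] else strings)
        strings)
      = fun strings length => strings ++ (extI al length [""]).filter (condF f t mi ma length) :=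
    funext fun acc => funext fun ℓ => hin ℓ acc
  rw [hout, PySem.List.foldl_append_eq_flatMap, List.nil_append]

-- gsStep, unfolded at a nonzero resp. zero length
theorem gsStep_succ (al : List String) (f t : String) (mi ma : Nat)
    (st : List String × List String) (k : Nat) (hk : k ≠ 0) :
    gsStep al f t mi ma st k =
      (if k < mi then (gsExtend al st.1, st.2)
       else (gsExtend al st.1, st.2 ++ (gsExtend al st.1).filter (condF f t mi ma k))) := by
  simp only [gsStep]
  rw [if_neg hk]
  by_cases h : k < mi
  · rw [if_pos h, if_pos h]
  · rw [if_neg h, if_neg h]; rfl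

theorem gsStep_zero (al : List String) (f t : String) (mi ma : Nat)
    (st : List String × List String) :
    gsStep al f t mi ma st 0 =
      (if 0 < mi then (st.1, st.2)
       else (st.1, st.2 ++ st.1.filter (condF f t mi ma 0))) := by
  simp only [gsStep, if_true]
  by_cases h : 0 < mi
  · rw [if_pos h, if_pos h]
  · rw [if_neg h, if_neg h]; rfl

-- B's loop from length s+1 on, given the invariant prefixes = extI al s [""]
theorem B_loop (al : List String) (f t : String) (mi ma : Nat) (m : Nat) :
    ∀ (s : Nat) (out : List String),
      (List.range' (s+1) m).foldl (gsStep al f t mi ma) (extI al s [""], out)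
      = (extI al (s+m) [""],
         out ++ (List.range' (s+1) m).flatMap
           (fun ℓ => if ℓ < mi then [] else (extI al ℓ [""]).filter (condF f t mi ma ℓ))) := by
  induction m with
  | zero => intro s out; simp [List.range']
  | succ m ih =>
      intro s out
      rw [List.range'_succ, List.foldl_cons]
      have hpre : gsStep al f t mi ma (extI al s [""], out) (s+1)
          = (extI al (s+1) [""],
             out ++ (if s+1 < mi then []
                     else (extI al (s+1) [""]).filter (condF f t mi ma (s+1)))) := by
        have hx : gsExtend al (extI al s [""]) = extI al (s+1) [""] := by
          rw [← extI_ext]; rfl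
        rw [gsStep_succ al f t mi ma _ _ (Nat.succ_ne_zero s)]
        by_cases h : s + 1 < mi
        · rw [if_pos h, if_pos h, hx, List.append_nil]
        · rw [if_neg h, if_neg h]
          show (gsExtend al (extI al s [""]), _) = _
          rw [hx]
      rw [hpre]
      have hs : s + 1 + 1 = (s + 1) + 1 := rfl
      rw [hs, ih (s+1)]
      have hadd : s + 1 + m = s + (m + 1) := by omega
      rw [hadd, List.flatMap_cons, List.append_assoc]

-- B's whole fold, for arbitrary bounds, as a flatMap over lengths 0..ma
theorem B_fold (al : List String) (f t : String) (mi ma : Nat) :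
    ((List.range (ma + 1)).foldl (gsStep al f t mi ma) ([""], [])).2
    = (List.range' 0 (ma + 1)).flatMap
        (fun ℓ => if ℓ < mi then [] else (extI al ℓ [""]).filter (condF f t mi ma ℓ)) := by
  rw [List.range_eq_range', List.range'_succ, List.foldl_cons]
  have h0 : gsStep al f t mi ma ([""], []) 0
      = (extI al 0 [""],
         [] ++ (if 0 < mi then [] else (extI al 0 [""]).filter (condF f t mi ma 0))) := by
    rw [gsStep_zero]
    by_cases h : 0 < mi
    · rw [if_pos h, if_pos h]; rfl
    · rw [if_neg h, if_neg h]; rfl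
  rw [h0]
  rw [show (0 : Nat) + 1 = 0 + 1 from rfl]
  rw [B_loop al f t mi ma ma 0]
  rw [List.flatMap_cons]
  simp

-- dropping the skipped lengths 0..mi-1 turns B's range into A's
theorem glue (g : Nat → List String) (mi ma : Nat) :
    (List.range' 0 (ma + 1)).flatMap (fun ℓ => if ℓ < mi then [] else g ℓ)
    = (List.range' mi (ma + 1 - mi)).flatMap g := by
  by_cases h : mi ≤ ma + 1
  · have hsplit : List.range' 0 (ma + 1) = List.range' 0 mi ++ List.range' mi (ma + 1 - mi) := by
      rw [show ma + 1 = mi + (ma + 1 - mi) by omega]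
      have := List.range'_append (s := 0) (m := mi) (n := ma + 1 - mi) (step := 1)
      simpa using this.symm
    rw [hsplit, List.flatMap_append]
    have h1 : (List.range' 0 mi).flatMap (fun ℓ => if ℓ < mi then [] else g ℓ) = [] := by
      rw [List.flatMap_eq_nil_iff]
      intro x hx
      rw [List.mem_range'_1] at hx
      simp [show x < mi by omega]
    have h2 : (List.range' mi (ma + 1 - mi)).flatMap (fun ℓ => if ℓ < mi then [] else g ℓ)
        = (List.range' mi (ma + 1 - mi)).flatMap g := by
      apply List.flatMap_congr
      intro x hx
      rw [List.mem_range'_1] at hx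
      simp [show ¬ x < mi by omega]
    rw [h1, h2, List.nil_append]
  · rw [show ma + 1 - mi = 0 by omega]
    rw [show List.range' mi 0 = [] from rfl, List.flatMap_nil]
    rw [List.flatMap_eq_nil_iff]
    intro x hx
    rw [List.mem_range'_1] at hx
    simp [show x < mi by omega]

-- ===== VERDICT (by name: the statement is the Claim_ definition above) =====
theorem generate_strings_spec : Claim_equal_generate_strings := by
  intro al f t _
  unfold Spec_generate_strings
  show (List.range' (if f ≠ "" then (PySem.Str.len f).toNat else 0)
      ((PySem.Str.len t).toNat + 1 - (if f ≠ "" then (PySem.Str.len f).toNat else 0))).foldl _ []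
    = generate_strings_alt al f t
  rw [A_fold al f t (if f ≠ "" then (PySem.Str.len f).toNat else 0) (PySem.Str.len t).toNat]
  show _ = ((List.range ((PySem.Str.len t).toNat + 1)).foldl
      (gsStep al f t (if f ≠ "" then (PySem.Str.len f).toNat else 0) (PySem.Str.len t).toNat)
      ([""], [])).2
  rw [B_fold al f t (if f ≠ "" then (PySem.Str.len f).toNat else 0) (PySem.Str.len t).toNat]
  rw [glue (fun ℓ => (extI al ℓ [""]).filter
      (condF f t (if f ≠ "" then (PySem.Str.len f).toNat else 0) (PySem.Str.len t).toNat ℓ))]
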